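-- pv_equiv track=rewrite | github.com/Nareeek/Codesignal_tasks | lineEncoding.py | lineEncoding
-- ===== SOURCE A (Python) =====
-- def lineEncoding(s):
--     l = []
--     L = []
--     for i in s:
--         S = str(s.count(i)) + i if s.count(i) != 1 else i
--         if S not in l:
--             l.append(S)
--
--     return "".join(l)
-- ===== SOURCE B (Python) =====
-- def lineEncoding(s):
--     counts = {}
--     for ch in s:
--         counts[ch] = counts.get(ch, 0) + 1
--     return "".join(ch if c == 1 else str(c) + ch for ch, c in counts.items())
-- ===== Notes on version B (the rewrite author's own statement) =====
-- stated objective: faster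
-- what changed: Builds a frequency dict in one pass and emits each distinct char (first-appearance order) with its count from the dict items, instead of calling s.count inside the loop and deduplicating via list membership.
import Mathlib
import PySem

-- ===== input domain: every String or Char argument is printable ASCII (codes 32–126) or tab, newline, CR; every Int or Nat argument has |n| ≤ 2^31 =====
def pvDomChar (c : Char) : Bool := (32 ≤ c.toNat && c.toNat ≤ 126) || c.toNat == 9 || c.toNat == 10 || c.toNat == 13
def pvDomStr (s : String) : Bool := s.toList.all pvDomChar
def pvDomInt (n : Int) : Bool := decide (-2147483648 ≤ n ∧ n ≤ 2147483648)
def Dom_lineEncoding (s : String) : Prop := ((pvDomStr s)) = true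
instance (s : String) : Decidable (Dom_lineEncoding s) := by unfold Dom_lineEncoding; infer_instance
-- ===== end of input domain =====

-- B replaces A's per-character s.count calls and list-membership dedup by a one-pass
-- frequency dict whose distinct keys (first-appearance order) are emitted once each (faster).


-- ===== PORT A =====
-- 'str(s.count(i)) + i if s.count(i) != 1 else i'; s.count(i) for the single
-- character i is exactly the occurrence count cs.count i (exact on all inputs).
def encA (cs : List Char) (i : Char) : List Char :=
  if (cs.count i : Int) ≠ 1 then PySem.Int.toChars (cs.count i) ++ [i] else [i]

def lineEncoding (s : String) : String :=
  let cs := s.toList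
  -- l : the Python list 'l' of strings, as lists of chars; "".join(l) = flatten
  let l : List (List Char) :=
    cs.foldl (fun l i => let S := encA cs i; if S ∈ l then l else l ++ [S]) []
  String.ofList l.flatten

-- ===== PORT B =====
def lineEncoding_alt (s : String) : String :=
  let counts : PySem.Dict Char Int :=
    s.toList.foldl (fun d ch => d.insert ch (d.getD ch 0 + 1)) PySem.Dict.empty
  String.ofList ((counts.items.map
    (fun p => if p.2 == 1 then [p.1] else PySem.Int.toChars p.2 ++ [p.1])).flatten)

-- ===== PRECONDITION & SPEC =====
def Spec_lineEncoding (s : String) (out : String) : Prop := out = lineEncoding_alt s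
instance (s : String) (out : String) : Decidable (Spec_lineEncoding s out) := by unfold Spec_lineEncoding; infer_instance

-- ===== CLAIM (what is proved, stated in full; the proofs are below) =====
def Claim_equal_lineEncoding : Prop := ∀ (s : String), Dom_lineEncoding s → Spec_lineEncoding s (lineEncoding s)

-- ===== LEMMAS AND PROOFS =====

-- encA always ends in its character, so it is injective where we need it
theorem encA_getLast? (cs : List Char) (i : Char) : (encA cs i).getLast? = some i := by
  unfold encA; split <;> simp

-- A's dedup loop over a prefix p builds exactly the encodings of p's distinct chars in order
theorem lineEncoding_loop (cs p : List Char) :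
    p.foldl (fun l i => let S := encA cs i; if S ∈ l then l else l ++ [S]) []
      = (PySem.Set.ofList p).map (encA cs) := by
  induction p using List.reverseRecOn with
  | nil => simp [PySem.Set.ofList]
  | append_singleton p x ih =>
    rw [List.foldl_append, List.foldl_cons, List.foldl_nil, ih,
        PySem.Set.ofList_append_singleton, PySem.Set.add_eq_ite]
    by_cases hx : x ∈ PySem.Set.ofList p
    · simp only [hx, if_true]
      have : encA cs x ∈ (PySem.Set.ofList p).map (encA cs) := List.mem_map_of_mem hx
      simp [this]
    · simp only [hx, if_false]
      have : encA cs x ∉ (PySem.Set.ofList p).map (encA cs) := by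
        intro hmem
        rcases List.mem_map.mp hmem with ⟨y, hy, hxy⟩
        have : some y = some x := by
          rw [← encA_getLast? cs y, ← encA_getLast? cs x, hxy]
        exact hx (Option.some.inj this ▸ hy)
      simp [this]

-- ===== VERDICT (by name: the statement is the Claim_ definition above) =====
theorem lineEncoding_spec : Claim_equal_lineEncoding := by
  intro s _
  unfold Spec_lineEncoding lineEncoding lineEncoding_alt
  rw [PySem.Dict.foldl_insert_getD_add_one_eq_counter]
  show String.ofList (((s.toList).foldl
      (fun l i => let S := encA (s.toList) i; if S ∈ l then l else l ++ [S]) []).flatten) = _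
  rw [lineEncoding_loop]
  show _ = String.ofList ((List.map
      (fun p : Char × Int => if p.2 == 1 then [p.1] else PySem.Int.toChars p.2 ++ [p.1])
      (PySem.Dict.counter s.toList).items).flatten)
  rw [PySem.Dict.items_counter, List.map_map]
  congr 1
  refine congrArg _ (List.map_congr_left fun k _ => ?_)
  simp only [Function.comp, encA]
  by_cases h : (s.toList.count k : Int) = 1 <;> simp [h]
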